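-- pv_equiv track=rewrite | github.com/borisshmul/schem_review | schem_review/waivers.py | _parse_toml_minimal
-- ===== SOURCE A (Python) =====
-- from typing import Dict, List, Tuple
--
-- def _parse_toml_minimal(text: str) -> List[Dict]:
--     """Parse [[waiver]] sections from TOML without any dependency."""
--     waivers: List[Dict] = []
--     current: Dict | None = None
--     for raw_line in text.splitlines():
--         line = raw_line.strip()
--         if not line or line.startswith("#"):
--             continue
--         if line == "[[waiver]]":
--             if current is not None:
--                 waivers.append(current)
--             current = {}
--             continue
--         if current is not None and "=" in line and not line.startswith("["):
--             key, _, val = line.partition("=")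
--             key = key.strip()
--             val = val.strip()
--             # Strip quotes
--             if (val.startswith('"') and val.endswith('"')) or \
--                (val.startswith("'") and val.endswith("'")):
--                 val = val[1:-1]
--             current[key] = val
--     if current is not None:
--         waivers.append(current)
--     return waivers
-- ===== SOURCE B (Python) =====
-- from typing import Dict, List
--
--
-- def _section_to_dict(lines: List[str]) -> Dict:
--     d: Dict = {}
--     for raw in lines:
--         line = raw.strip()
--         if not line or line[0] in "#[" or "=" not in line:
--             continue
--         i = line.find("=")
--         key = line[:i].strip()
--         val = line[i + 1:].strip()
--         if val[:1] == val[-1:] and val[:1] in ('"', "'"):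
--             val = val[1:-1]
--         d[key] = val
--     return d
--
--
-- def _parse_toml_minimal(text: str) -> List[Dict]:
--     """Two-pass: group lines into [[waiver]] sections, then map each section to a dict."""
--     sections: List[List[str]] = []
--     cur = None
--     for raw in text.splitlines():
--         if raw.strip() == "[[waiver]]":
--             if cur is not None:
--                 sections.append(cur)
--             cur = []
--         elif cur is not None:
--             cur.append(raw)
--     if cur is not None:
--         sections.append(cur)
--     return [_section_to_dict(sec) for sec in sections]
-- ===== Notes on version B (the rewrite author's own statement) =====
-- stated objective: simpler
-- what changed: A's single stateful pass (Optional current dict threaded through every line) is replaced by a two-pass decomposition: first group the lines into [[waiver]] sections, then map each section independently to a dict, with a combined one-test skip condition and a head/last-char quote check per line.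
import Mathlib
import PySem

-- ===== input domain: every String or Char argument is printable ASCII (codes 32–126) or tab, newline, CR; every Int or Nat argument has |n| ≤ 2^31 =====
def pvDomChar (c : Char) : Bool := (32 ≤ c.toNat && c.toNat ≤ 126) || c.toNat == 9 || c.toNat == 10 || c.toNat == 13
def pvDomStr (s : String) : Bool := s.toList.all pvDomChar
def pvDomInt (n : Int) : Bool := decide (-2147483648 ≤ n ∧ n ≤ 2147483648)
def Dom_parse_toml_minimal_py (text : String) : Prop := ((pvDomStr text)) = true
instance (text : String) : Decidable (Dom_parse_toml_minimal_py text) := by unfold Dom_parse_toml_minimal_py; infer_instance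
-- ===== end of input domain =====

-- B replaces A's single stateful pass by a two-pass decomposition (group lines into sections, then map each section to a dict); objective: simpler.

-- ===== PORT A =====
-- one loop step of A's for-loop; state = (waivers, current)
def pvA_step (st : List (PySem.Dict String String) × Option (PySem.Dict String String))
    (raw : String) : List (PySem.Dict String String) × Option (PySem.Dict String String) :=
  let line := PySem.Str.strip raw
  if line = "" ∨ PySem.Str.startswith line "#" = true then st
  else if line = "[[waiver]]" then
    (match st.2 with | some c => st.1 ++ [c] | none => st.1, some PySem.Dict.empty)
  else
    match st.2 with
    | some c =>
      if PySem.Str.isIn "=" line = true ∧ ¬ PySem.Str.startswith line "[" = true then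
        -- key, _, val = line.partition("="): ported by hand as find + slices; exact here since "=" ∈ line in this branch
        let i : Int := PySem.Str.find line "="
        let key := PySem.Str.strip (PySem.Str.slice line none (some i))
        let val := PySem.Str.strip (PySem.Str.slice line (some (i + 1)) none)
        let val := if (PySem.Str.startswith val "\"" = true ∧ PySem.Str.endswith val "\"" = true)
                      ∨ (PySem.Str.startswith val "'" = true ∧ PySem.Str.endswith val "'" = true)
                   then PySem.Str.slice val (some 1) (some (-1)) else val
        (st.1, some (c.insert key val))
      else st
    | none => st

def parse_toml_minimal_py (text : String) : List (List (String × String)) :=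
  let st := (PySem.Str.splitlines text).foldl pvA_step ([], none)
  (match st.2 with | some c => st.1 ++ [c] | none => st.1).map PySem.Dict.items

-- ===== PORT B =====
-- one line of _section_to_dict's loop
def pvB_line (d : PySem.Dict String String) (raw : String) : PySem.Dict String String :=
  let line := PySem.Str.strip raw
  -- 'if not line or line[0] in "#[" or "=" not in line: continue'  (line[0] ported via pyGet?; line is nonempty there)
  if line = "" ∨ PySem.Str.pyGet? line 0 = some '#' ∨ PySem.Str.pyGet? line 0 = some '['
      ∨ ¬ PySem.Str.isIn "=" line = true then d
  else
    let i : Int := PySem.Str.find line "="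
    let key := PySem.Str.strip (PySem.Str.slice line none (some i))
    let val := PySem.Str.strip (PySem.Str.slice line (some (i + 1)) none)
    -- 'if val and val[0] == val[-1] and val[0] in "\"'"'  (val[0]/val[-1] via pyGet?)
    let val := if ¬ val = "" ∧ PySem.Str.pyGet? val 0 = PySem.Str.pyGet? val (-1)
                  ∧ (PySem.Str.pyGet? val 0 = some '"' ∨ PySem.Str.pyGet? val 0 = some '\'')
               then PySem.Str.slice val (some 1) (some (-1)) else val
    d.insert key val

def pvB_section (lines : List String) : PySem.Dict String String :=
  lines.foldl pvB_line PySem.Dict.empty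

-- one step of the grouping loop; state = (sections, cur)
def pvB_group_step (st : List (List String) × Option (List String)) (raw : String) :
    List (List String) × Option (List String) :=
  if PySem.Str.strip raw = "[[waiver]]" then
    (match st.2 with | some c => st.1 ++ [c] | none => st.1, some [])
  else
    match st.2 with
    | some c => (st.1, some (c ++ [raw]))
    | none => st

def parse_toml_minimal_py_alt (text : String) : List (List (String × String)) :=
  let st := (PySem.Str.splitlines text).foldl pvB_group_step ([], none)
  (match st.2 with | some c => st.1 ++ [c] | none => st.1).map (fun sec => (pvB_section sec).items)

-- ===== PRECONDITION & SPEC =====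
def Spec_parse_toml_minimal_py (text : String) (out : List (List (String × String))) : Prop := out = parse_toml_minimal_py_alt text
instance (text : String) (out : List (List (String × String))) : Decidable (Spec_parse_toml_minimal_py text out) := by unfold Spec_parse_toml_minimal_py; infer_instance

-- ===== CLAIM (what is proved, stated in full; the proofs are below) =====
def Claim_equal_parse_toml_minimal_py : Prop := ∀ (text : String), Dom_parse_toml_minimal_py text → Spec_parse_toml_minimal_py text (parse_toml_minimal_py text)

-- ===== LEMMAS AND PROOFS =====

lemma pv_prefix_single {x c : Char} {cs : List Char} : [x] <+: (c :: cs) ↔ x = c := by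
  constructor
  · rintro ⟨t, h⟩
    injection h with h1 _
  · rintro rfl
    exact ⟨cs, rfl⟩

lemma pv_suffix_single {x : Char} {l : List Char} : [x] <:+ l ↔ l.getLast? = some x := by
  constructor
  · rintro ⟨t, rfl⟩
    simp
  · intro h
    obtain ⟨l', rfl⟩ := List.getLast?_eq_some_iff.mp h
    exact ⟨l', rfl⟩

lemma pv_pyGet0 (c : Char) (cs : List Char) : PySem.List.pyGet? (c :: cs) 0 = some c := by
  simp [PySem.List.pyGet?, PySem.List.pyIdx?]

lemma pv_pyGetNeg1 (c : Char) (cs : List Char) :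
    PySem.List.pyGet? (c :: cs) (-1) = (c :: cs).getLast? := by
  simp [PySem.List.pyGet?, PySem.List.pyIdx?, List.getLast?_eq_getElem?]

-- A's quote-stripping condition coincides with B's
lemma pv_quote_cond (val : String) :
    ((PySem.Str.startswith val "\"" = true ∧ PySem.Str.endswith val "\"" = true)
      ∨ (PySem.Str.startswith val "'" = true ∧ PySem.Str.endswith val "'" = true))
    ↔ (¬ val = "" ∧ PySem.Str.pyGet? val 0 = PySem.Str.pyGet? val (-1)
        ∧ (PySem.Str.pyGet? val 0 = some '"' ∨ PySem.Str.pyGet? val 0 = some '\'')) := by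
  by_cases hv : val = ""
  · subst hv
    decide
  · have hnil : val.toList ≠ [] := fun h => hv (String.toList_eq_nil_iff.mp h)
    cases hl : val.toList with
    | nil => exact absurd hl hnil
    | cons c cs =>
      obtain ⟨a, ha⟩ : ∃ a, (c :: cs).getLast? = some a := ⟨_, List.getLast?_cons⟩
      simp only [PySem.Str.startswith_eq, PySem.Str.endswith_eq, PySem.Str.pyGet?_eq,
        PySem.Chars.pyGet?_eq_listPyGet?, hl]
      rw [show ("\"" : String).toList = ['"'] from rfl, show ("'" : String).toList = ['\''] from rfl]
      simp only [PySem.Chars.startswith_iff, PySem.Chars.endswith_iff, pv_prefix_single,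
        pv_suffix_single, pv_pyGet0, pv_pyGetNeg1, ha, hv, Option.some_inj]
      constructor
      · rintro (⟨rfl, rfl⟩ | ⟨rfl, rfl⟩) <;> simp
      · rintro ⟨-, rfl, (rfl | rfl)⟩ <;> simp

-- per-line agreement inside an open section (line ≠ header)
lemma pv_line_eq (w : List (PySem.Dict String String)) (d : PySem.Dict String String) (raw : String)
    (h : PySem.Str.strip raw ≠ "[[waiver]]") :
    pvA_step (w, some d) raw = (w, some (pvB_line d raw)) := by
  unfold pvA_step pvB_line
  dsimp only
  by_cases he : PySem.Str.strip raw = ""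
  · rw [if_pos (Or.inl he), if_pos (Or.inl he)]
  · obtain ⟨c, cs, hl⟩ : ∃ c cs, (PySem.Str.strip raw).toList = c :: cs := by
      cases h' : (PySem.Str.strip raw).toList with
      | nil => exact absurd (String.toList_eq_nil_iff.mp h') he
      | cons c cs => exact ⟨c, cs, rfl⟩
    have hget : PySem.Str.pyGet? (PySem.Str.strip raw) 0 = some c := by
      simp only [PySem.Str.pyGet?_eq, PySem.Chars.pyGet?_eq_listPyGet?, hl, pv_pyGet0]
    have hsw : ∀ (p : String) (x : Char), p.toList = [x] →
        (PySem.Str.startswith (PySem.Str.strip raw) p = true ↔ c = x) := by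
      intro p x hp
      rw [PySem.Str.startswith_eq, hl, hp, PySem.Chars.startswith_iff, pv_prefix_single, eq_comm]
    by_cases hc : c = '#'
    · have h1 : PySem.Str.startswith (PySem.Str.strip raw) "#" = true := (hsw "#" '#' rfl).mpr hc
      rw [if_pos (Or.inr h1), if_pos (Or.inr (Or.inl (hget.trans (by rw [hc]))))]
    · have h1 : ¬ (PySem.Str.strip raw = "" ∨ PySem.Str.startswith (PySem.Str.strip raw) "#" = true) := by
        rintro (h' | h')
        · exact he h'
        · exact hc ((hsw "#" '#' rfl).mp h')
      rw [if_neg h1, if_neg h]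
      by_cases hbr : c = '['
      · have hswb : PySem.Str.startswith (PySem.Str.strip raw) "[" = true := (hsw "[" '[' rfl).mpr hbr
        rw [if_neg (by rintro ⟨-, h'⟩; exact h' hswb),
            if_pos (Or.inr (Or.inr (Or.inl (hget.trans (by rw [hbr])))))]
      · by_cases hin : PySem.Str.isIn "=" (PySem.Str.strip raw) = true
        · have hA : PySem.Str.isIn "=" (PySem.Str.strip raw) = true
              ∧ ¬ PySem.Str.startswith (PySem.Str.strip raw) "[" = true :=
            ⟨hin, fun h' => hbr ((hsw "[" '[' rfl).mp h')⟩
          have hB : ¬ (PySem.Str.strip raw = "" ∨ PySem.Str.pyGet? (PySem.Str.strip raw) 0 = some '#'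
              ∨ PySem.Str.pyGet? (PySem.Str.strip raw) 0 = some '['
              ∨ ¬ PySem.Str.isIn "=" (PySem.Str.strip raw) = true) := by
            rintro (h' | h' | h' | h')
            · exact he h'
            · exact hc (Option.some_inj.mp (hget.symm.trans h'))
            · exact hbr (Option.some_inj.mp (hget.symm.trans h'))
            · exact h' hin
          have hq := pv_quote_cond (PySem.Str.strip
            (PySem.Str.slice (PySem.Str.strip raw) (some (PySem.Str.find (PySem.Str.strip raw) "=" + 1)) none))
          rw [if_pos hA, if_neg hB, if_congr hq rfl rfl]
        · rw [if_neg (fun h' => hin h'.1), if_pos (Or.inr (Or.inr (Or.inr hin)))]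

-- before the first header, A keeps skipping
lemma pv_none_eq (w : List (PySem.Dict String String)) (raw : String)
    (h : PySem.Str.strip raw ≠ "[[waiver]]") :
    pvA_step (w, none) raw = (w, none) := by
  unfold pvA_step
  dsimp only
  by_cases h1 : PySem.Str.strip raw = "" ∨ PySem.Str.startswith (PySem.Str.strip raw) "#" = true
  · rw [if_pos h1]
  · rw [if_neg h1, if_neg h]

-- loop invariant: A's fold is the pvB_section-image of B's grouping fold
lemma pv_loop_eq (lines : List String) (secs : List (List String)) (cur : Option (List String)) :
    lines.foldl pvA_step (secs.map pvB_section, cur.map pvB_section)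
      = ((lines.foldl pvB_group_step (secs, cur)).1.map pvB_section,
         (lines.foldl pvB_group_step (secs, cur)).2.map pvB_section) := by
  induction lines generalizing secs cur with
  | nil => rfl
  | cons raw rest ih =>
    simp only [List.foldl_cons]
    by_cases hh : PySem.Str.strip raw = "[[waiver]]"
    · have hA : pvA_step (secs.map pvB_section, cur.map pvB_section) raw
          = ((pvB_group_step (secs, cur) raw).1.map pvB_section,
             (pvB_group_step (secs, cur) raw).2.map pvB_section) := by
        unfold pvA_step pvB_group_step
        rw [hh]
        cases cur <;> simp [pvB_section, PySem.Dict.empty] <;> decide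
      rw [hA]
      exact ih _ _
    · have hA : pvA_step (secs.map pvB_section, cur.map pvB_section) raw
          = ((pvB_group_step (secs, cur) raw).1.map pvB_section,
             (pvB_group_step (secs, cur) raw).2.map pvB_section) := by
        unfold pvB_group_step
        rw [if_neg hh]
        cases cur with
        | none => simpa using pv_none_eq (secs.map pvB_section) raw hh
        | some s =>
          have := pv_line_eq (secs.map pvB_section) (pvB_section s) raw hh
          simpa [pvB_section, List.foldl_append] using this
      rw [hA]
      exact ih _ _

-- ===== VERDICT (by name: the statement is the Claim_ definition above) =====
theorem parse_toml_minimal_py_spec : Claim_equal_parse_toml_minimal_py := by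
  intro text _
  unfold Spec_parse_toml_minimal_py parse_toml_minimal_py parse_toml_minimal_py_alt
  have h := pv_loop_eq (PySem.Str.splitlines text) [] none
  simp only [List.map_nil, Option.map_none] at h
  rw [h]
  cases hs : ((PySem.Str.splitlines text).foldl pvB_group_step ([], none)).2 <;>
    simp [hs, List.map_append]
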